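-- pv_equiv track=rewrite | github.com/EgalitarianMonkey/hometube | app/cut_utils.py | invert_segments_tuples
-- ===== SOURCE A (Python) =====
-- from typing import Dict, List, Callable, Tuple
--
-- def invert_segments_tuples(
--     segments: List[Tuple[int, int]], total_duration: int
-- ) -> List[Tuple[int, int]]:
--     """
--     LEGACY: Invert segments using tuple format (for backward compatibility).
--
--     Inverts segments (get the parts NOT in the segments).
--
--     Args:
--         segments: List of (start, end) tuples
--         total_duration: Total duration in seconds
--
--     Returns:
--         Inverted segments as list of (start, end) tuples
--     """
--     if not segments or total_duration <= 0:
--         return [(0, total_duration)] if total_duration > 0 else []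
--
--     # Sort segments by start time
--     sorted_segments = sorted(segments, key=lambda x: x[0])
--
--     inverted = []
--     last_end = 0
--
--     for start, end in sorted_segments:
--         # Add gap before this segment
--         if start > last_end:
--             inverted.append((last_end, start))
--         last_end = max(last_end, end)
--
--     # Add final segment if needed
--     if last_end < total_duration:
--         inverted.append((last_end, total_duration))
--
--     return inverted
-- ===== SOURCE B (Python) =====
-- def invert_segments_tuples(segments, total_duration):
--     if not segments or total_duration <= 0:
--         return [(0, total_duration)] if total_duration > 0 else []
--     # Pass 1: merge sorted segments into disjoint groups (running-max end).
--     ordered = sorted(segments, key=lambda x: x[0])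
--     cur_s, cur_e = ordered[0]
--     merged = []
--     for s, e in ordered[1:]:
--         if s > cur_e:
--             merged.append((cur_s, cur_e))
--             cur_s, cur_e = s, e
--         else:
--             cur_e = max(cur_e, e)
--     merged.append((cur_s, cur_e))
--     # Pass 2: invert the merged cover.
--     gaps = []
--     prev = 0
--     for s, e in merged:
--         if s > prev:
--             gaps.append((prev, s))
--         prev = max(prev, e)
--     if prev < total_duration:
--         gaps.append((prev, total_duration))
--     return gaps
-- ===== Notes on version B (the rewrite author's own statement) =====
-- stated objective: alternative
-- what changed: B decomposes the job into two passes: first merge the sorted segments into disjoint covered groups with a running-max end, then a separate invert pass over that merged cover; A computes gaps in a single fold over the raw sorted segments.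
import Mathlib
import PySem

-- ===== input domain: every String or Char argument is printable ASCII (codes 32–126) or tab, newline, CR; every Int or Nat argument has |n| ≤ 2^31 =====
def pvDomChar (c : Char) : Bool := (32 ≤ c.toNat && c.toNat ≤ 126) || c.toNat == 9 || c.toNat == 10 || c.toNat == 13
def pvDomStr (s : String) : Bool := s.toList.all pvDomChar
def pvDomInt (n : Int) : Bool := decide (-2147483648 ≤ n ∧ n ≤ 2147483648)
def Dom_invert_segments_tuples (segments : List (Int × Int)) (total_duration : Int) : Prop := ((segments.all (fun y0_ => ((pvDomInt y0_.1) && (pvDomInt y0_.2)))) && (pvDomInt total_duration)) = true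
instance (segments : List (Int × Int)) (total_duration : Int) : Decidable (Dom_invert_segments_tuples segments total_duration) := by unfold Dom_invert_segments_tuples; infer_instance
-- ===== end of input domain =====

-- B replaces A's single gap-producing fold over the sorted segments by two passes:
-- merge the sorted segments into disjoint covered groups, then invert that merged cover.

-- ===== PORT A =====
def invert_segments_tuples (segments : List (Int × Int)) (total_duration : Int) : List (Int × Int) :=
  if segments = [] ∨ total_duration ≤ 0 then
    (if total_duration > 0 then [(0, total_duration)] else [])
  else
    let sorted_segments := PySem.List.sorted segments (fun x => x.1)
    let st := sorted_segments.foldl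
      (fun (p : List (Int × Int) × Int) seg =>
        (p.1 ++ (if seg.1 > p.2 then [(p.2, seg.1)] else []), max p.2 seg.2)) ([], 0)
    st.1 ++ (if st.2 < total_duration then [(st.2, total_duration)] else [])

-- ===== PORT B =====
-- pass 1 of Source B: merge sorted segments into disjoint groups, running-max end
def pvMergeGo (cs ce : Int) : List (Int × Int) → List (Int × Int)
  | [] => [(cs, ce)]
  | (s, e) :: rest => if s > ce then (cs, ce) :: pvMergeGo s e rest else pvMergeGo cs (max ce e) rest

-- pass 2 of Source B: emit the gaps of a merged cover, prev as running-max end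
def pvInvertGaps (prev total : Int) : List (Int × Int) → List (Int × Int)
  | [] => if prev < total then [(prev, total)] else []
  | (s, e) :: rest => (if s > prev then [(prev, s)] else []) ++ pvInvertGaps (max prev e) total rest

def invert_segments_tuples_alt (segments : List (Int × Int)) (total_duration : Int) : List (Int × Int) :=
  if segments = [] ∨ total_duration ≤ 0 then
    (if total_duration > 0 then [(0, total_duration)] else [])
  else
    match PySem.List.sorted segments (fun x => x.1) with
    | [] => []
    | (s, e) :: rest => pvInvertGaps 0 total_duration (pvMergeGo s e rest)

-- ===== PRECONDITION & SPEC =====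
def Spec_invert_segments_tuples (segments : List (Int × Int)) (total_duration : Int) (out : List (Int × Int)) : Prop := out = invert_segments_tuples_alt segments total_duration
instance (segments : List (Int × Int)) (total_duration : Int) (out : List (Int × Int)) : Decidable (Spec_invert_segments_tuples segments total_duration out) := by unfold Spec_invert_segments_tuples; infer_instance

-- ===== CLAIM (what is proved, stated in full; the proofs are below) =====
def Claim_equal_invert_segments_tuples : Prop := ∀ (segments : List (Int × Int)) (total_duration : Int), Dom_invert_segments_tuples segments total_duration → Spec_invert_segments_tuples segments total_duration (invert_segments_tuples segments total_duration)

-- ===== LEMMAS AND PROOFS =====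
def pvStep (p : List (Int × Int) × Int) (seg : Int × Int) : List (Int × Int) × Int :=
  (p.1 ++ (if seg.1 > p.2 then [(p.2, seg.1)] else []), max p.2 seg.2)

-- the invert pass over any list equals A's fold over that list followed by A's final append
theorem pvInvertGaps_eq_foldl (total : Int) (xs : List (Int × Int)) :
    ∀ (acc : List (Int × Int)) (prev : Int),
      acc ++ pvInvertGaps prev total xs =
        (xs.foldl pvStep (acc, prev)).1 ++
          (if (xs.foldl pvStep (acc, prev)).2 < total then [((xs.foldl pvStep (acc, prev)).2, total)] else []) := by
  induction xs with
  | nil => intro acc prev; simp [pvInvertGaps]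
  | cons hd tl ih =>
    intro acc prev
    obtain ⟨s, e⟩ := hd
    simp only [pvInvertGaps, List.foldl_cons, pvStep]
    rw [← List.append_assoc]
    exact ih _ _

-- merging commutes with A's gap fold
theorem pvMergeGo_foldl (xs : List (Int × Int)) :
    ∀ (cs ce : Int) (st : List (Int × Int) × Int),
      (pvMergeGo cs ce xs).foldl pvStep st = xs.foldl pvStep (pvStep st (cs, ce)) := by
  induction xs with
  | nil => intro cs ce st; simp [pvMergeGo]
  | cons hd tl ih =>
    intro cs ce st
    obtain ⟨s, e⟩ := hd
    by_cases h : s > ce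
    · simp only [pvMergeGo, if_pos h, List.foldl_cons, ih]
    · simp only [pvMergeGo, if_neg h, ih, List.foldl_cons]
      congr 1
      have hns : ¬ s > max st.2 ce := by
        push Not at h ⊢; exact le_trans h (le_max_right _ _)
      simp [pvStep, hns, max_assoc]

-- ===== VERDICT (by name: the statement is the Claim_ definition above) =====
theorem invert_segments_tuples_spec : Claim_equal_invert_segments_tuples := by
  intro segments total_duration _
  unfold Spec_invert_segments_tuples invert_segments_tuples invert_segments_tuples_alt
  by_cases hg : segments = [] ∨ total_duration ≤ 0
  · simp [hg]
  · simp only [if_neg hg]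
    have hne : segments ≠ [] := fun h => hg (Or.inl h)
    obtain ⟨s, e, rest, hs⟩ : ∃ s e rest, PySem.List.sorted segments (fun x => x.1) = (s, e) :: rest := by
      rcases h : PySem.List.sorted segments (fun x => x.1) with _ | ⟨⟨s, e⟩, rest⟩
      · exact absurd ((PySem.List.sorted_eq_nil_iff segments (fun x => x.1) false).mp h) hne
      · exact ⟨s, e, rest, rfl⟩
    rw [hs]
    have h1 := pvInvertGaps_eq_foldl total_duration (pvMergeGo s e rest) [] 0
    simp only [List.nil_append] at h1
    rw [pvMergeGo_foldl] at h1
    show ((((s, e) :: rest).foldl pvStep ([], 0)).1 ++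
        (if (((s, e) :: rest).foldl pvStep ([], 0)).2 < total_duration then
          [((((s, e) :: rest).foldl pvStep ([], 0)).2, total_duration)] else [])) =
      pvInvertGaps 0 total_duration (pvMergeGo s e rest)
    rw [List.foldl_cons]
    exact h1.symm
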